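-- pv_equiv track=rewrite | github.com/pzy2000/OpenHire | openhire/case_ops.py | _result_status
-- ===== SOURCE A (Python) =====
-- from typing import Any
--
-- def _result_status(results: list[dict[str, Any]]) -> str:
--     if not results:
--         return "empty"
--     if any(item.get("status") == "partial" for item in results):
--         return "partial"
--     failed = [item for item in results if item.get("status") == "failed"]
--     if not failed:
--         return "ok"
--     return "failed" if len(failed) == len(results) else "partial"
-- ===== SOURCE B (Python) =====
-- # B: abstract each item to a category, collect the DISTINCT categories present
-- # as a set, and read the answer off an 8-entry lookup table keyed by which
-- # categories occur. No scans over the list besides building the set, no counts,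
-- # no length comparison.
--
-- _TABLE = {
--     (False, False, False): "empty",
--     (False, False, True): "ok",
--     (False, True, False): "failed",
--     (False, True, True): "partial",
--     (True, False, False): "partial",
--     (True, False, True): "partial",
--     (True, True, False): "partial",
--     (True, True, True): "partial",
-- }
--
--
-- def _category(status):
--     return status if status in ("partial", "failed") else "other"
--
--
-- def _result_status(results):
--     cats = {_category(item.get("status")) for item in results}
--     key = ("partial" in cats, "failed" in cats, "other" in cats)
--     return _TABLE[key]
-- ===== Notes on version B (the rewrite author's own statement) =====
-- stated objective: alternative
-- what changed: B abstracts each item to a category (partial/failed/other), collects the set of categories present, and returns the answer from an 8-entry lookup table keyed by which categories occur, replacing A's staged scans (any, filter, length comparison) entirely.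
import Mathlib
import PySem

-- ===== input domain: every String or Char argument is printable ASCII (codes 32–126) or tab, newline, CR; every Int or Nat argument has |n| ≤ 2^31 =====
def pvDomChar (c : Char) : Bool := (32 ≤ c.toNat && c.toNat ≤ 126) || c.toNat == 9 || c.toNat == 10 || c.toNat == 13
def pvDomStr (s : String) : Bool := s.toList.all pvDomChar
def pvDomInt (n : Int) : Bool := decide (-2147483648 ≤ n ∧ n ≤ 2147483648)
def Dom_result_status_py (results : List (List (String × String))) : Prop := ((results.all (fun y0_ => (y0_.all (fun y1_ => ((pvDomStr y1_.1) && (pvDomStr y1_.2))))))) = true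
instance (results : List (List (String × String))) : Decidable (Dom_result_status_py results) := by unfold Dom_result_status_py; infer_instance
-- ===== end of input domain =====

-- B classifies by the SET of status categories present (table lookup), replacing A's staged scans; objective: alternative.

-- item.get("status"): first-match lookup in the association list (Python dict lookup)
def pvStatus (item : List (String × String)) : Option String :=
  (PySem.Dict.mk item).get? "status"

-- ===== PORT A =====
def result_status_py (results : List (List (String × String))) : String :=
  if results = [] then "empty"
  else if results.any (fun item => pvStatus item == some "partial") then "partial"
  else
    let failed := results.filter (fun item => pvStatus item == some "failed")
    if failed = [] then "ok"
    else if failed.length = results.length then "failed" else "partial"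

-- ===== PORT B =====
-- _category(status): the status itself if it is "partial"/"failed", else "other"
def pvCategory (status : Option String) : String :=
  if status == some "partial" || status == some "failed" then status.getD "other"
  else "other"

-- the 8-entry table, a literal Python dict keyed by a bool triple
def pvTable : PySem.Dict (Bool × Bool × Bool) String :=
  PySem.Dict.mk
    [ ((false, false, false), "empty"), ((false, false, true), "ok")
    , ((false, true, false), "failed"), ((false, true, true), "partial")
    , ((true, false, false), "partial"), ((true, false, true), "partial")
    , ((true, true, false), "partial"), ((true, true, true), "partial") ]

def result_status_py_alt (results : List (List (String × String))) : String :=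
  let cats : PySem.Set String :=
    PySem.Set.ofList (results.map (fun item => pvCategory (pvStatus item)))
  let key := (cats.contains "partial", cats.contains "failed", cats.contains "other")
  -- _TABLE[key]: the key is always present, so get? is always some
  (pvTable.get? key).getD ""

-- ===== PRECONDITION & SPEC =====
def Spec_result_status_py (results : List (List (String × String))) (out : String) : Prop := out = result_status_py_alt results
instance (results : List (List (String × String))) (out : String) : Decidable (Spec_result_status_py results out) := by unfold Spec_result_status_py; infer_instance

-- ===== CLAIM (what is proved, stated in full; the proofs are below) =====
def Claim_equal_result_status_py : Prop := ∀ (results : List (List (String × String))), Dom_result_status_py results → Spec_result_status_py results (result_status_py results)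

-- ===== LEMMAS AND PROOFS =====

theorem pvContains_cat (results : List (List (String × String))) (c : String) :
    (PySem.Set.ofList (results.map (fun item => pvCategory (pvStatus item)))).contains c
      = results.any (fun item => pvCategory (pvStatus item) == c) := by
  rcases h : results.any (fun item => pvCategory (pvStatus item) == c) with _ | _
  · simp only [List.any_eq_false, beq_iff_eq] at h
    simp only [PySem.Set.contains_eq_listContains, List.contains_eq_mem,
      decide_eq_false_iff_not, PySem.Set.mem_ofList, List.mem_map]
    rintro ⟨item, hm, rfl⟩
    exact h item hm rfl
  · simp only [List.any_eq_true, beq_iff_eq] at h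
    obtain ⟨item, hm, hc⟩ := h
    simp only [PySem.Set.contains_eq_listContains, List.contains_eq_mem, decide_eq_true_eq,
      PySem.Set.mem_ofList, List.mem_map]
    exact ⟨item, hm, hc⟩

theorem pvCat_partial (item : List (String × String)) :
    (pvCategory (pvStatus item) == "partial") = (pvStatus item == some "partial") := by
  unfold pvCategory
  rcases pvStatus item with _ | s
  · decide
  · simp only [Option.getD_some]
    by_cases hp : s = "partial"
    · simp [hp]
    · by_cases hf : s = "failed" <;> simp [hp, hf]

theorem pvCat_failed (item : List (String × String)) :
    (pvCategory (pvStatus item) == "failed") = (pvStatus item == some "failed") := by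
  unfold pvCategory
  rcases pvStatus item with _ | s
  · decide
  · simp only [Option.getD_some]
    by_cases hp : s = "partial"
    · simp [hp]
    · by_cases hf : s = "failed" <;> simp [hp, hf]

theorem pvCat_other (item : List (String × String)) :
    (pvCategory (pvStatus item) == "other")
      = (!(pvStatus item == some "partial") && !(pvStatus item == some "failed")) := by
  unfold pvCategory
  rcases pvStatus item with _ | s
  · decide
  · simp only [Option.getD_some]
    by_cases hp : s = "partial"
    · simp [hp]
    · by_cases hf : s = "failed" <;> simp [hp, hf]

-- ===== VERDICT (by name: the statement is the Claim_ definition above) =====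
theorem result_status_py_spec : Claim_equal_result_status_py := by
  intro results _
  unfold Spec_result_status_py result_status_py result_status_py_alt
  simp only [pvContains_cat, pvCat_partial, pvCat_failed, pvCat_other]
  by_cases hp : results.any (fun item => pvStatus item == some "partial") = true
  · -- some item partial: both sides are "partial"
    have hne : results ≠ [] := by
      rcases List.any_eq_true.mp hp with ⟨a, ha, _⟩
      exact List.ne_nil_of_mem ha
    simp only [hp, if_true]
    rw [if_neg hne]
    cases hb : results.any (fun item => pvStatus item == some "failed") <;>
      cases hc : results.any (fun item =>
        !(pvStatus item == some "partial") && !(pvStatus item == some "failed")) <;> decide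
  · have hp' : ∀ a ∈ results, ¬ (pvStatus a == some "partial") = true := by
      simpa [List.any_eq_false] using hp
    by_cases hf : results.any (fun item => pvStatus item == some "failed") = true
    · have hne : results ≠ [] := by
        rcases List.any_eq_true.mp hf with ⟨a, ha, _⟩
        exact List.ne_nil_of_mem ha
      have hfilter : results.filter (fun item => pvStatus item == some "failed") ≠ [] := by
        rcases List.any_eq_true.mp hf with ⟨a, ha, hfa⟩
        exact List.ne_nil_of_mem (List.mem_filter.mpr ⟨ha, hfa⟩)
      by_cases ho : results.any (fun item =>
          !(pvStatus item == some "partial") && !(pvStatus item == some "failed")) = true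
      · -- failed and other both present → "partial" on both sides
        have hlt : (results.filter (fun item => pvStatus item == some "failed")).length
            ≠ results.length := by
          intro hlen
          rcases List.any_eq_true.mp ho with ⟨a, ha, hoa⟩
          have := (List.length_filter_eq_length_iff.mp hlen) a ha
          simp [this] at hoa
        simp [hne, hp, hf, ho, hfilter, hlt]
        decide
      · -- everything failed → "failed" on both sides
        have hall : (results.filter (fun item => pvStatus item == some "failed")).length
            = results.length := by
          apply List.length_filter_eq_length_iff.mpr
          intro a ha
          have ho' : ∀ a ∈ results,
              ¬ (!(pvStatus a == some "partial") && !(pvStatus a == some "failed")) = true := by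
            simpa [List.any_eq_false] using ho
          have := ho' a ha
          have hpa := hp' a ha
          rcases hb : (pvStatus a == some "failed") with _ | _
          · simp [hb] at this
            exact absurd (by simp [this]) hpa
          · rfl
        simp [hne, hp, hf, ho, hfilter, hall]
        decide
    · have hf' : results.filter (fun item => pvStatus item == some "failed") = [] := by
        apply List.filter_eq_nil_iff.mpr
        simpa [List.any_eq_false] using hf
      by_cases ho : results.any (fun item =>
          !(pvStatus item == some "partial") && !(pvStatus item == some "failed")) = true
      · -- only "other" items → "ok" on both sides
        have hne : results ≠ [] := by
          rcases List.any_eq_true.mp ho with ⟨a, ha, _⟩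
          exact List.ne_nil_of_mem ha
        simp [hne, hp, hf, ho, hf']
        decide
      · -- no category at all → the list is empty → "empty" on both sides
        have hnil : results = [] := by
          rcases results with _ | ⟨a, rest⟩
          · rfl
          · exfalso
            have hpa := hp' a (List.mem_cons_self)
            have hfa : ¬ (pvStatus a == some "failed") = true := by
              have : ∀ x ∈ a :: rest, ¬ (pvStatus x == some "failed") = true := by
                simpa [List.any_eq_false] using hf
              exact this a (List.mem_cons_self)
            have ho' : ∀ x ∈ a :: rest,
                ¬ (!(pvStatus x == some "partial") && !(pvStatus x == some "failed")) = true := by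
              simpa [List.any_eq_false] using ho
            have := ho' a (List.mem_cons_self)
            have hx : (pvStatus a == some "partial") = false := Bool.eq_false_iff.mpr hpa
            have hy : (pvStatus a == some "failed") = false := Bool.eq_false_iff.mpr hfa
            simp [hx, hy] at this
        simp [hnil]
        decide
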